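-- pv_equiv track=rewrite | github.com/rprusak/Advent-of-code-2018 | 2/main.py | contains_exactly_count_of_any_letter
-- ===== SOURCE A (Python) =====
-- def contains_exactly_count_of_any_letter(word: str, count: int = 2) -> bool :
--     temp_dict = {}
--
--     for letter in word:
--         if letter in temp_dict.keys():
--             temp_dict[letter] += 1
--         else:
--             temp_dict[letter] = 1
--
--     for val in temp_dict.values():
--         if val == count:
--             return True
--
--     return False
-- ===== SOURCE B (Python) =====
-- def contains_exactly_count_of_any_letter(word: str, count: int = 2) -> bool:
--     s = sorted(word)
--     while s:
--         c = s[0]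
--         run = 1
--         while run < len(s) and s[run] == c:
--             run += 1
--         if run == count:
--             return True
--         s = s[run:]
--     return False
-- ===== Notes on version B (the rewrite author's own statement) =====
-- stated objective: alternative
-- what changed: Replaced the dict-based frequency count plus a scan over the counter's values with sort-then-scan: sort the letters and walk the sorted copy once, measuring each maximal run of equal letters and returning True as soon as a run's length equals count.
import Mathlib
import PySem

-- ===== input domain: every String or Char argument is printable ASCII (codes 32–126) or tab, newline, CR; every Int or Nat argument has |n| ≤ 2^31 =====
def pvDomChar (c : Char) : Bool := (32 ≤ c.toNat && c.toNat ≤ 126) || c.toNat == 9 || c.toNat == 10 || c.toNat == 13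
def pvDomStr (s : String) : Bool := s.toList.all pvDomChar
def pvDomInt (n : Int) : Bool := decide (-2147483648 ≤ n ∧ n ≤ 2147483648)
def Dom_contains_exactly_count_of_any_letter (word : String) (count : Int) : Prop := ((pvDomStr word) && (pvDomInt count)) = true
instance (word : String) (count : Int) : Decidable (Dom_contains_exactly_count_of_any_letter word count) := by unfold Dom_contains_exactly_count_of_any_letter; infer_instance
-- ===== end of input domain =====

-- B replaces A's dict-based frequency counting with a sort-then-scan over maximal runs
-- of equal letters (alternative algorithm of similar cost); return values proved equal.

-- ===== PORT A =====
-- for letter in word: if letter in dict: dict[letter]+=1 else dict[letter]=1;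
-- then: for val in dict.values(): if val == count: return True; return False
def contains_exactly_count_of_any_letter (word : String) (count : Int) : Bool :=
  let d := word.toList.foldl
    (fun (d : PySem.Dict Char Int) letter =>
      if d.contains letter then d.insert letter (d.getD letter 0 + 1)
      else d.insert letter 1)
    PySem.Dict.empty
  d.values.any (fun val => val == count)

-- ===== PORT B =====
-- the outer 'while s:' loop of Source B: c = s[0]; advance run past equal letters
-- (the inner while = takeWhile), test the run length, then s = s[run:]
def pvRunScan (count : Int) : List Char → Bool
  | [] => false
  | c :: rest =>
    let run := (rest.takeWhile (fun x => x == c)).length + 1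
    if (run : Int) == count then true
    else pvRunScan count (rest.dropWhile (fun x => x == c))
termination_by l => l.length
decreasing_by
  simp only [List.length_cons]
  exact Nat.lt_succ_of_le (List.length_dropWhile_le _ _)

def contains_exactly_count_of_any_letter_alt (word : String) (count : Int) : Bool :=
  pvRunScan count (PySem.List.sorted word.toList (fun x => x) false)

-- ===== PRECONDITION & SPEC =====
def Spec_contains_exactly_count_of_any_letter (word : String) (count : Int) (out : Bool) : Prop := out = contains_exactly_count_of_any_letter_alt word count
instance (word : String) (count : Int) (out : Bool) : Decidable (Spec_contains_exactly_count_of_any_letter word count out) := by unfold Spec_contains_exactly_count_of_any_letter; infer_instance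

-- ===== CLAIM (what is proved, stated in full; the proofs are below) =====
def Claim_equal_contains_exactly_count_of_any_letter : Prop := ∀ (word : String) (count : Int), Dom_contains_exactly_count_of_any_letter word count → Spec_contains_exactly_count_of_any_letter word count (contains_exactly_count_of_any_letter word count)

-- ===== LEMMAS AND PROOFS =====

-- absent key looks up to the default
theorem pv_getD_zero_of_not_contains (d : PySem.Dict Char Int) (c : Char)
    (h : d.contains c = false) : d.getD c 0 = 0 := by
  simp only [PySem.Dict.contains, List.any_eq_false] at h
  simp [PySem.Dict.getD, PySem.Dict.get?, List.find?_eq_none.mpr h]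

-- A's counting loop builds exactly Counter(word)
theorem pv_foldA_eq_counter (l : List Char) :
    l.foldl
      (fun (d : PySem.Dict Char Int) letter =>
        if d.contains letter then d.insert letter (d.getD letter 0 + 1)
        else d.insert letter 1)
      PySem.Dict.empty = PySem.Dict.counter l := by
  rw [← PySem.Dict.foldl_insert_getD_add_one_eq_counter]
  congr 1
  funext d c
  by_cases h : d.contains c = true
  · simp [h]
  · simp only [Bool.not_eq_true] at h
    simp [h, pv_getD_zero_of_not_contains d c h]

-- characterisation of port A
theorem pv_A_iff (word : String) (count : Int) :
    contains_exactly_count_of_any_letter word count = true ↔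
      ∃ c ∈ word.toList, (word.toList.count c : Int) = count := by
  unfold contains_exactly_count_of_any_letter
  rw [pv_foldA_eq_counter]
  simp only [PySem.Dict.values, PySem.Dict.items_counter, List.map_map, List.any_eq_true]
  constructor
  · rintro ⟨v, hv, hbeq⟩
    obtain ⟨c, hc, rfl⟩ := List.mem_map.mp hv
    exact ⟨c, (PySem.Set.mem_ofList _ _).mp hc, by simpa using hbeq⟩
  · rintro ⟨c, hc, hcnt⟩
    exact ⟨(word.toList.count c : Int),
      List.mem_map.mpr ⟨c, (PySem.Set.mem_ofList _ _).mpr hc, rfl⟩, by simpa using hcnt⟩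

-- in a sorted list c :: rest, nothing equal to c survives dropWhile (== c)
theorem pv_tail_ne (c : Char) (rest : List Char) (hs : (c :: rest).Pairwise (· ≤ ·)) :
    ∀ x ∈ rest.dropWhile (fun x => x == c), x ≠ c := by
  intro x hx
  have hcle : ∀ y ∈ rest, c ≤ y := (List.pairwise_cons.mp hs).1
  have hrestpw : rest.Pairwise (· ≤ ·) := (List.pairwise_cons.mp hs).2
  have hsub : (rest.dropWhile (fun x => x == c)).Sublist rest := List.dropWhile_sublist _
  have htpw : (rest.dropWhile (fun x => x == c)).Pairwise (· ≤ ·) := hrestpw.sublist hsub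
  rcases hd : rest.dropWhile (fun x => x == c) with _ | ⟨d, t⟩
  · rw [hd] at hx; simp at hx
  · rw [hd] at hx hsub htpw
    have hdne : (d == c) = false := by
      have := List.head?_dropWhile_not (fun x => x == c) rest
      rw [hd] at this; simpa using this
    have hdc : d ≠ c := by simpa using hdne
    have hcd : c < d :=
      lt_of_le_of_ne (hcle d (hsub.mem List.mem_cons_self)) (fun h => hdc h.symm)
    rcases List.mem_cons.mp hx with h1 | hxt
    · subst h1; exact hdc
    · have hdx : d ≤ x := (List.pairwise_cons.mp htpw).1 x hxt
      exact fun h => absurd (h ▸ hdx) (not_le.mpr hcd)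

-- characterisation of the run scan on a sorted list
theorem pv_runScan_iff (count : Int) (m : List Char) (hs : m.Pairwise (· ≤ ·)) :
    pvRunScan count m = true ↔ ∃ c ∈ m, (m.count c : Int) = count := by
  induction m using pvRunScan.induct (count := count) with
  | case1 => simp [pvRunScan]
  | case2 c rest run hif =>
    rw [pvRunScan]
    rw [if_pos hif]
    refine iff_of_true rfl ?_
    have hrun : ((rest.takeWhile (fun x => x == c)).length + 1 : Int) = count := by
      simpa using hif
    refine ⟨c, List.mem_cons_self, ?_⟩
    have hsplit : rest = rest.takeWhile (fun x => x == c) ++ rest.dropWhile (fun x => x == c) :=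
      (List.takeWhile_append_dropWhile).symm
    have htake : ∀ x ∈ rest.takeWhile (fun x => x == c), x = c := by
      intro x hx
      have := List.mem_takeWhile_imp hx
      simpa using this
    have hctail : c ∉ rest.dropWhile (fun x => x == c) :=
      fun hc => pv_tail_ne c rest hs c hc rfl
    have : (c :: rest).count c = (rest.takeWhile (fun x => x == c)).length + 1 := by
      rw [List.count_cons_self]
      conv_lhs => rw [hsplit]
      rw [List.count_append, List.count_eq_zero.mpr hctail,
        List.count_eq_length.mpr (by intro x hx; simpa using (htake x hx).symm)]
    rw [this]; exact_mod_cast hrun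
  | case3 c rest run hif ih =>
    rw [pvRunScan]
    rw [if_neg hif]
    have hrun : ((rest.takeWhile (fun x => x == c)).length + 1 : Int) ≠ count := by
      simpa using hif
    have hsplit : rest = rest.takeWhile (fun x => x == c) ++ rest.dropWhile (fun x => x == c) :=
      (List.takeWhile_append_dropWhile).symm
    have htake : ∀ x ∈ rest.takeWhile (fun x => x == c), x = c := by
      intro x hx
      have := List.mem_takeWhile_imp hx
      simpa using this
    have hrestpw : rest.Pairwise (· ≤ ·) := (List.pairwise_cons.mp hs).2
    have hsub : (rest.dropWhile (fun x => x == c)).Sublist rest := List.dropWhile_sublist _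
    have htpw : (rest.dropWhile (fun x => x == c)).Pairwise (· ≤ ·) := hrestpw.sublist hsub
    have hne : ∀ x ∈ rest.dropWhile (fun x => x == c), x ≠ c := pv_tail_ne c rest hs
    have hctail : c ∉ rest.dropWhile (fun x => x == c) := fun hc => hne c hc rfl
    -- counts: m.count c = run length; m.count x = tail.count x for x in the tail
    have hcountc : (c :: rest).count c = (rest.takeWhile (fun x => x == c)).length + 1 := by
      rw [List.count_cons_self]
      conv_lhs => rw [hsplit]
      rw [List.count_append, List.count_eq_zero.mpr hctail,
        List.count_eq_length.mpr (by intro x hx; simpa using (htake x hx).symm)]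
    have hcountx : ∀ x, x ≠ c →
        (c :: rest).count x = (rest.dropWhile (fun x => x == c)).count x := by
      intro x hxc
      rw [List.count_cons_of_ne (Ne.symm hxc)]
      conv_lhs => rw [hsplit]
      rw [List.count_append, List.count_eq_zero.mpr
        (fun hmem => hxc (htake x hmem))]
      omega
    rw [ih htpw]
    constructor
    · rintro ⟨x, hx, hcnt⟩
      refine ⟨x, ?_, ?_⟩
      · exact List.mem_cons_of_mem _ (by rw [hsplit]; exact List.mem_append_right _ hx)
      · rw [hcountx x (hne x hx)]; exact hcnt
    · rintro ⟨x, hx, hcnt⟩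
      by_cases hxc : x = c
      · subst hxc
        exfalso; apply hrun
        rw [hcountc] at hcnt; exact_mod_cast hcnt
      · refine ⟨x, ?_, ?_⟩
        · rcases List.mem_cons.mp hx with rfl | hxr
          · exact absurd rfl hxc
          · rw [hsplit] at hxr
            rcases List.mem_append.mp hxr with hxt | hxd
            · exact absurd (htake x hxt) hxc
            · exact hxd
        · rw [← hcountx x hxc]; exact hcnt

-- characterisation of port B
theorem pv_B_iff (word : String) (count : Int) :
    contains_exactly_count_of_any_letter_alt word count = true ↔
      ∃ c ∈ word.toList, (word.toList.count c : Int) = count := by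
  unfold contains_exactly_count_of_any_letter_alt
  have hperm : (PySem.List.sorted word.toList (fun x => x) false).Perm word.toList :=
    PySem.List.sorted_perm _ _ _
  have hpw : (PySem.List.sorted word.toList (fun x => x) false).Pairwise (· ≤ ·) := by
    simpa using PySem.List.sorted_pairwise word.toList (fun x => x)
  rw [pv_runScan_iff count _ hpw]
  constructor
  · rintro ⟨c, hc, hcnt⟩
    exact ⟨c, hperm.mem_iff.mp hc, by rw [← hperm.count_eq]; exact hcnt⟩
  · rintro ⟨c, hc, hcnt⟩
    exact ⟨c, hperm.mem_iff.mpr hc, by rw [hperm.count_eq]; exact hcnt⟩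

-- ===== VERDICT (by name: the statement is the Claim_ definition above) =====
theorem contains_exactly_count_of_any_letter_spec : Claim_equal_contains_exactly_count_of_any_letter := by
  intro word count _
  unfold Spec_contains_exactly_count_of_any_letter
  rw [Bool.eq_iff_iff, pv_A_iff, pv_B_iff]
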